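-- pv_equiv track=rewrite | github.com/lamantinX/perenoska | specs/.instructions/.scripts/validate-docs-technology.py | has_content
-- ===== SOURCE A (Python) =====
-- def has_content(section_text: str) -> bool:
--     """Проверить, содержит ли секция таблицы, code-блоки, h3 или обычный текст."""
--     stripped = section_text.strip()
--     has_table = "|" in stripped and "---" in stripped
--     has_h3 = "### " in stripped
--     has_code = "```" in stripped
--     # Обычный текст (не HTML-комментарий, не пустые строки)
--     text_lines = [
--         line for line in stripped.split("\n")
--         if line.strip()
--         and not line.strip().startswith("<!--")
--         and not line.strip().startswith("-->")
--         and not line.strip().startswith("---")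
--     ]
--     return has_table or has_h3 or has_code or len(text_lines) > 0
-- ===== SOURCE B (Python) =====
-- def has_content(section_text: str) -> bool:
--     """Character-level state machine: one scan over the stripped text, no substring
--     searches and no line splitting.  Run counters detect '---', '### ' and '```';
--     a <=4-char prefix buffer per line decides the plain-text test."""
--     stripped = section_text.strip()
--     pipe = dash3 = h3 = code = text = False
--     drun = hrun = trun = 0        # current consecutive runs of '-', '#', '`'
--     buf = []                      # first (up to 4) chars of the line after leading whitespace
--
--     def line_is_text():
--         return (bool(buf)
--                 and buf != ['<', '!', '-', '-']
--                 and buf[:3] != ['-', '-', '>']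
--                 and buf[:3] != ['-', '-', '-'])
--
--     for ch in stripped:
--         if ch == '\n':
--             if line_is_text():
--                 text = True
--             buf = []
--             drun = hrun = trun = 0
--             continue
--         if ch == '|':
--             pipe = True
--         drun = drun + 1 if ch == '-' else 0
--         if drun >= 3:
--             dash3 = True
--         trun = trun + 1 if ch == '`' else 0
--         if trun >= 3:
--             code = True
--         if ch == ' ' and hrun >= 3:
--             h3 = True
--         hrun = hrun + 1 if ch == '#' else 0
--         if not (len(buf) == 0 and ch.isspace()) and len(buf) < 4:
--             buf.append(ch)
--     if line_is_text():
--         text = True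
--     return (pipe and dash3) or h3 or code or text
-- ===== Notes on version B (the rewrite author's own statement) =====
-- stated objective: alternative
-- what changed: A runs four independent whole-string substring searches plus a split-into-lines comprehension; B is a character-level finite-state machine: a single scan over the stripped text with run counters for the dash, heading and code-fence markers, a pipe flag, and a bounded per-line prefix buffer replacing the line split and the prefix tests.
import Mathlib
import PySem

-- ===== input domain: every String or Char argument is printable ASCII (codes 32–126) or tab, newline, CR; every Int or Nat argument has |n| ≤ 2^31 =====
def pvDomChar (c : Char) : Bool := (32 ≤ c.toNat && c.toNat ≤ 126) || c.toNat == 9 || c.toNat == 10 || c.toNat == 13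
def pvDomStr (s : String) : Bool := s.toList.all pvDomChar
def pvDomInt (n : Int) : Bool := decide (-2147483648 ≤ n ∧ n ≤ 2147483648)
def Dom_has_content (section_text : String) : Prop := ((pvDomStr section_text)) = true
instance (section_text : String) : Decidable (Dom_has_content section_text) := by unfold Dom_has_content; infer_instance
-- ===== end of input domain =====

-- B replaces A's four whole-string substring searches and the line comprehension by a
-- character-level finite-state machine: one scan with run counters for the marker
-- patterns and a bounded per-line prefix buffer (alternative algorithm, same asymptotic cost).

set_option maxRecDepth 8192


-- ===== PORT A =====
-- line.strip() truthy and not an HTML-comment/HR line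
def pvTextLine (line : List Char) : Bool :=
  !(PySem.Chars.strip line).isEmpty
  && !(PySem.Chars.startswith (PySem.Chars.strip line) "<!--".toList)
  && !(PySem.Chars.startswith (PySem.Chars.strip line) "-->".toList)
  && !(PySem.Chars.startswith (PySem.Chars.strip line) "---".toList)

def has_content (section_text : String) : Bool :=
  let stripped := PySem.Chars.strip section_text.toList
  let has_table := PySem.Chars.isIn "|".toList stripped && PySem.Chars.isIn "---".toList stripped
  let has_h3 := PySem.Chars.isIn "### ".toList stripped
  let has_code := PySem.Chars.isIn "```".toList stripped
  let text_lines := (PySem.Chars.splitOn stripped ['\n']).filter pvTextLine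
  has_table || has_h3 || has_code || decide (text_lines.length > 0)

-- ===== PORT B =====
-- the per-line finalisation test on the (≤ 4 char) prefix buffer
def pvLineIsText (buf : List Char) : Bool :=
  !buf.isEmpty && buf ≠ "<!--".toList && buf.take 3 ≠ "-->".toList && buf.take 3 ≠ "---".toList

-- one loop-body line each: the '|' flag, a 3-run detector (used for '-' and '`'),
-- the '### ' detector, and the text flag with its prefix buffer
def pvStepPipe (p : Bool) (ch : Char) : Bool :=
  if ch = '\n' then p else p || (ch == '|')

def pvStepRun (mark : Char) (st : Bool × Nat) (ch : Char) : Bool × Nat :=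
  if ch = '\n' then (st.1, 0)
  else
    let r := if ch == mark then st.2 + 1 else 0
    (st.1 || decide (r ≥ 3), r)

def pvStepH3 (st : Bool × Nat) (ch : Char) : Bool × Nat :=
  if ch = '\n' then (st.1, 0)
  else (st.1 || (ch == ' ' && decide (st.2 ≥ 3)), if ch == '#' then st.2 + 1 else 0)

def bufUpd (buf : List Char) (c : Char) : List Char :=
  if !(buf.isEmpty && PySem.Chars.isspace c) && buf.length < 4 then buf ++ [c] else buf

def pvStepText (st : Bool × List Char) (ch : Char) : Bool × List Char :=
  if ch = '\n' then (st.1 || pvLineIsText st.2, [])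
  else (st.1, bufUpd st.2 ch)

def pvStep (st : Bool × (Bool × Nat) × (Bool × Nat) × (Bool × Nat) × (Bool × List Char)) (ch : Char) :
    Bool × (Bool × Nat) × (Bool × Nat) × (Bool × Nat) × (Bool × List Char) :=
  (pvStepPipe st.1 ch, pvStepRun '-' st.2.1 ch, pvStepH3 st.2.2.1 ch,
   pvStepRun '`' st.2.2.2.1 ch, pvStepText st.2.2.2.2 ch)

def has_content_alt (section_text : String) : Bool :=
  let stripped := PySem.Chars.strip section_text.toList
  let st := stripped.foldl pvStep (false, (false, 0), (false, 0), (false, 0), (false, []))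
  let text := st.2.2.2.2.1 || pvLineIsText st.2.2.2.2.2
  (st.1 && st.2.1.1) || st.2.2.1.1 || st.2.2.2.1.1 || text

-- ===== PRECONDITION & SPEC =====
def Spec_has_content (section_text : String) (out : Bool) : Prop := out = has_content_alt section_text
instance (section_text : String) (out : Bool) : Decidable (Spec_has_content section_text out) := by unfold Spec_has_content; infer_instance

-- ===== CLAIM (what is proved, stated in full; the proofs are below) =====
def Claim_equal_has_content : Prop := ∀ (section_text : String), Dom_has_content section_text → Spec_has_content section_text (has_content section_text)

-- ===== LEMMAS AND PROOFS =====

-- split1 c s = (first piece, remaining pieces) of splitting s at every c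
def split1 (c : Char) : List Char → List Char × List (List Char)
  | [] => ([], [])
  | a :: rest =>
      let r := split1 c rest
      if a = c then ([], r.1 :: r.2) else (a :: r.1, r.2)

theorem splitOn_go_eq (c : Char) (l : List Char) : ∀ (fuel : Nat) (cur : List Char) (acc : List (List Char)),
    l.length < fuel →
    PySem.Chars.splitOn.go [c] fuel l cur acc
      = acc.reverse ++ (cur.reverse ++ (split1 c l).1) :: (split1 c l).2 := by
  induction l with
  | nil =>
      intro fuel cur acc h
      match fuel with
      | fuel + 1 => simp [PySem.Chars.splitOn.go, split1]
  | cons a rest ih =>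
      intro fuel cur acc h
      simp only [List.length_cons] at h
      match fuel with
      | fuel + 1 =>
        by_cases hc : a = c
        · subst hc
          simp only [PySem.Chars.splitOn.go, List.isPrefixOf, BEq.rfl, Bool.true_and, if_pos]
          rw [show List.drop [a].length (a :: rest) = rest from rfl,
              ih fuel [] (cur.reverse :: acc) (by omega)]
          simp [split1]
        · have hpre : [c].isPrefixOf (a :: rest) = false := by
            simp [List.isPrefixOf]; exact fun h' => (hc h'.symm).elim
          simp only [PySem.Chars.splitOn.go, hpre, Bool.false_eq_true, if_false]
          rw [ih fuel (a :: cur) acc (by omega)]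
          simp [split1, hc]

theorem splitOn_eq_split1 (c : Char) (s : List Char) :
    PySem.Chars.splitOn s [c] = (split1 c s).1 :: (split1 c s).2 := by
  unfold PySem.Chars.splitOn
  rw [splitOn_go_eq c s (s.length + 1) [] [] (by omega)]
  simp

theorem filter_pos_eq_any {α : Type} (L : List α) (p : α → Bool) :
    decide ((L.filter p).length > 0) = L.any p := by
  rcases h : L.any p with _ | _
  · rw [List.any_eq_false] at h
    rw [List.filter_eq_nil_iff.mpr h]
    simp
  · rw [List.any_eq_true] at h
    rcases h with ⟨x, hx, hp⟩
    simp [List.length_pos_of_mem (List.mem_filter.mpr ⟨hx, hp⟩)]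

-- the big fold acts componentwise
theorem foldl_pvStep (s : List Char) (a : Bool) (b c d : Bool × Nat) (e : Bool × List Char) :
    s.foldl pvStep (a, b, c, d, e)
      = (s.foldl pvStepPipe a, s.foldl (pvStepRun '-') b, s.foldl pvStepH3 c,
         s.foldl (pvStepRun '`') d, s.foldl pvStepText e) := by
  induction s generalizing a b c d e with
  | nil => rfl
  | cons x t ih => simp [List.foldl_cons, pvStep, ih]

-- pipe component = any '|'
theorem foldl_pipe (s : List Char) (b : Bool) :
    s.foldl pvStepPipe b = (b || s.any (fun c => c == '|')) := by
  induction s generalizing b with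
  | nil => simp
  | cons x t ih =>
      have hx : pvStepPipe b x = (b || (x == '|')) := by
        by_cases h : x = '\n' <;> simp [pvStepPipe, h]
      simp [List.foldl_cons, ih, hx, Bool.or_assoc]

theorem isIn_singleton (c : Char) (s : List Char) :
    PySem.Chars.isIn [c] s = s.any (fun x => x == c) := by
  rcases h : PySem.Chars.isIn [c] s with _ | _
  · rw [PySem.Chars.isIn_eq_false_iff] at h
    symm; rw [List.any_eq_false]
    intro x hx hc
    rw [beq_iff_eq] at hc; subst hc
    rcases List.append_of_mem hx with ⟨l₁, l₂, rfl⟩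
    exact h ⟨l₁, l₂, by simp⟩
  · rw [PySem.Chars.isIn_iff_infix] at h
    have : c ∈ s := h.subset (by simp)
    symm; rw [List.any_eq_true]; exact ⟨c, this, by simp⟩

-- run detectors stay true
theorem foldl_run_true (mark : Char) (s : List Char) (r : Nat) :
    (s.foldl (pvStepRun mark) (true, r)).1 = true := by
  induction s generalizing r with
  | nil => rfl
  | cons x t ih =>
      by_cases h : x = '\n' <;> simp [List.foldl_cons, pvStepRun, h, ih]

theorem foldl_h3_true (s : List Char) (r : Nat) :
    (s.foldl pvStepH3 (true, r)).1 = true := by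
  induction s generalizing r with
  | nil => rfl
  | cons x t ih =>
      by_cases h : x = '\n' <;> simp [List.foldl_cons, pvStepH3, h, ih]

-- extra non-mark head is invisible to the 3-run pattern
theorem infix_run_elim (mark c : Char) (t : List Char) (r : Nat) (hr : r ≤ 2) (hc : c ≠ mark) :
    ([mark, mark, mark] <:+: List.replicate r mark ++ c :: t) ↔ ([mark, mark, mark] <:+: t) := by
  interval_cases r <;>
    simp [List.replicate, List.infix_cons_iff, List.cons_prefix_cons, Ne.symm hc]

theorem foldl_run_eq (mark : Char) (hm : mark ≠ '\n') (s : List Char) (r : Nat) (hr : r ≤ 2) :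
    (s.foldl (pvStepRun mark) (false, r)).1
      = decide ([mark, mark, mark] <:+: List.replicate r mark ++ s) := by
  induction s generalizing r with
  | nil =>
      simp only [List.foldl_nil, List.append_nil]
      symm; rw [decide_eq_false_iff_not]
      intro h
      have := h.length_le
      simp at this; omega
  | cons x t ih =>
      by_cases hx : x = '\n'
      · subst hx
        rw [List.foldl_cons, show pvStepRun mark (false, r) '\n' = (false, 0) from by simp [pvStepRun],
            ih 0 (by omega)]
        simp only [List.replicate_zero, List.nil_append]
        congr 1
        exact propext (infix_run_elim mark '\n' t r hr (fun h => hm h.symm)).symm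
      · by_cases hxm : x = mark
        · subst hxm
          rw [List.foldl_cons, show pvStepRun x (false, r) x = (decide (r + 1 ≥ 3), r + 1) from by
            simp [pvStepRun, hx]]
          by_cases h3 : r + 1 ≥ 3
          · have hr2 : r = 2 := by omega
            subst hr2
            rw [show (decide (2 + 1 ≥ 3) : Bool) = true from by decide, foldl_run_true]
            symm; rw [decide_eq_true_iff]
            exact ⟨[], t, by simp [List.replicate]⟩
          · rw [show (decide (r + 1 ≥ 3) : Bool) = false from by simp; omega,
                ih (r + 1) (by omega)]
            congr 1
            rw [List.replicate_succ' ]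
            simp
        · rw [List.foldl_cons, show pvStepRun mark (false, r) x = (false, 0) from by
            simp [pvStepRun, hx, hxm], ih 0 (by omega)]
          simp only [List.replicate_zero, List.nil_append]
          congr 1
          exact propext (infix_run_elim mark x t r hr hxm).symm

-- '### ' detector
theorem infix_h3_elim (c : Char) (t : List Char) (k : Nat) (hk : k ≤ 3) (hc : c ≠ '#') (hcs : c ≠ ' ') :
    (['#', '#', '#', ' '] <:+: List.replicate k '#' ++ c :: t) ↔ (['#', '#', '#', ' '] <:+: t) := by
  interval_cases k <;>
    simp [List.replicate, List.infix_cons_iff, List.cons_prefix_cons, Ne.symm hc, Ne.symm hcs]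

theorem infix_h3_hash (t : List Char) :
    (['#', '#', '#', ' '] <:+: '#' :: '#' :: '#' :: '#' :: t) ↔ (['#', '#', '#', ' '] <:+: '#' :: '#' :: '#' :: t) := by
  simp [List.infix_cons_iff, List.cons_prefix_cons]

theorem infix_h3_space (t : List Char) (k : Nat) (hk : k ≤ 2) :
    (['#', '#', '#', ' '] <:+: List.replicate k '#' ++ ' ' :: t) ↔ (['#', '#', '#', ' '] <:+: t) := by
  interval_cases k <;>
    simp [List.replicate, List.infix_cons_iff, List.cons_prefix_cons]

theorem foldl_h3_eq (s : List Char) (r : Nat) :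
    (s.foldl pvStepH3 (false, r)).1
      = decide (['#', '#', '#', ' '] <:+: List.replicate (min r 3) '#' ++ s) := by
  induction s generalizing r with
  | nil =>
      simp only [List.foldl_nil, List.append_nil]
      symm; rw [decide_eq_false_iff_not]
      intro h
      have := h.length_le
      simp at this
  | cons x t ih =>
      by_cases hx : x = '\n'
      · subst hx
        rw [List.foldl_cons, show pvStepH3 (false, r) '\n' = (false, 0) from by simp [pvStepH3],
            ih 0]
        simp only [Nat.min_eq_left (by omega : (0:Nat) ≤ 3), List.replicate_zero, List.nil_append]
        congr 1
        exact propext (infix_h3_elim '\n' t (min r 3) (by omega) (by decide) (by decide)).symm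
      · by_cases hxh : x = '#'
        · subst hxh
          rw [List.foldl_cons, show pvStepH3 (false, r) '#' = (false, r + 1) from by
            simp [pvStepH3], ih (r + 1)]
          congr 1
          by_cases hr3 : r ≥ 3
          · rw [show min (r+1) 3 = 3 from by omega, show min r 3 = 3 from by omega]
            refine propext ?_
            simpa [List.replicate] using (infix_h3_hash t).symm
          · rw [show min (r+1) 3 = r+1 from by omega, show min r 3 = r from by omega,
                List.replicate_succ']
            simp
        · by_cases hxs : x = ' '
          · subst hxs
            rw [List.foldl_cons, show pvStepH3 (false, r) ' ' = (decide (r ≥ 3), 0) from by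
              simp [pvStepH3]]
            by_cases hr3 : r ≥ 3
            · rw [show (decide (r ≥ 3) : Bool) = true from by simp [hr3], foldl_h3_true]
              symm; rw [decide_eq_true_iff]
              rw [show min r 3 = 3 from by omega]
              exact ⟨[], t, by simp [List.replicate]⟩
            · rw [show (decide (r ≥ 3) : Bool) = false from by simp; omega, ih 0]
              simp only [Nat.min_eq_left (by omega : (0:Nat) ≤ 3), List.replicate_zero, List.nil_append]
              congr 1
              exact propext (infix_h3_space t (min r 3) (by omega)).symm
          · rw [List.foldl_cons, show pvStepH3 (false, r) x = (false, 0) from by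
              simp [pvStepH3, hx, hxh, hxs], ih 0]
            simp only [Nat.min_eq_left (by omega : (0:Nat) ≤ 3), List.replicate_zero, List.nil_append]
            congr 1
            exact propext (infix_h3_elim x t (min r 3) (by omega) hxh hxs).symm

-- text component: buffer evolution over a line
theorem foldl_bufUpd_ne (l : List Char) (buf : List Char) (h : buf ≠ []) :
    l.foldl bufUpd buf = buf ++ l.take (4 - buf.length) := by
  induction l generalizing buf with
  | nil => simp
  | cons c t ih =>
      rw [List.foldl_cons]
      by_cases h4 : buf.length < 4
      · rw [show bufUpd buf c = buf ++ [c] from by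
          simp [bufUpd, h4, h]]
        rw [ih (buf ++ [c]) (by simp)]
        simp only [List.length_append, List.length_cons, List.length_nil]
        rw [List.append_assoc]
        congr 1
        rw [show 4 - buf.length = (4 - (buf.length + 1)) + 1 from by omega]
        simp
      · rw [show bufUpd buf c = buf from by simp [bufUpd, h4], ih buf h]
        rw [show 4 - buf.length = 0 from by omega]
        simp

theorem foldl_bufUpd_nil (l : List Char) :
    l.foldl bufUpd [] = (l.dropWhile PySem.Chars.isspace).take 4 := by
  induction l with
  | nil => simp
  | cons c t ih =>
      by_cases hc : PySem.Chars.isspace c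
      · rw [List.foldl_cons, show bufUpd [] c = [] from by simp [bufUpd, hc], ih,
            List.dropWhile_cons_of_pos hc]
      · rw [List.foldl_cons, show bufUpd [] c = [c] from by simp [bufUpd, hc],
            foldl_bufUpd_ne t [c] (by simp), List.dropWhile_cons_of_neg hc]
        simp

-- final text flag after the whole fold = per-line test over split1
theorem foldl_text_eq (s : List Char) (b : Bool) (buf : List Char) :
    ((s.foldl pvStepText (b, buf)).1 || pvLineIsText (s.foldl pvStepText (b, buf)).2)
      = (b || pvLineIsText ((split1 '\n' s).1.foldl bufUpd buf)
           || ((split1 '\n' s).2).any (fun l => pvLineIsText (l.foldl bufUpd []))) := by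
  induction s generalizing b buf with
  | nil => simp [split1]
  | cons c t ih =>
      by_cases hc : c = '\n'
      · subst hc
        rw [List.foldl_cons, show pvStepText (b, buf) '\n' = (b || pvLineIsText buf, []) from by
          simp [pvStepText], ih]
        simp [split1, Bool.or_assoc]
      · rw [List.foldl_cons, show pvStepText (b, buf) c = (b, bufUpd buf c) from by
          simp [pvStepText, hc], ih]
        simp [split1, hc]

-- strip / prefix bridge
theorem dropWhile_head_not (p : Char → Bool) (l : List Char) (c : Char) (t : List Char)
    (h : l.dropWhile p = c :: t) : p c = false := by
  induction l with
  | nil => simp at h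
  | cons a r ih =>
      by_cases ha : p a
      · rw [List.dropWhile_cons_of_pos ha] at h; exact ih h
      · rw [List.dropWhile_cons_of_neg ha] at h
        cases h; simpa using ha

theorem strip_decomp (u : List Char) :
    ∃ w, u = PySem.Chars.rstrip u ++ w ∧ ∀ x ∈ w, PySem.Chars.isspace x = true := by
  refine ⟨(u.reverse.takeWhile PySem.Chars.isspace).reverse, ?_, ?_⟩
  · unfold PySem.Chars.rstrip
    conv_lhs => rw [← List.reverse_reverse u,
      ← List.takeWhile_append_dropWhile (p := PySem.Chars.isspace) (l := u.reverse)]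
    rw [List.reverse_append]
  · intro x hx
    rw [List.mem_reverse] at hx
    exact List.mem_takeWhile_imp hx

theorem prefix_rstrip_iff (u p : List Char) (hp : ∀ x ∈ p, PySem.Chars.isspace x = false) :
    (p <+: PySem.Chars.rstrip u) ↔ (p <+: u) := by
  obtain ⟨w, hw, hws⟩ := strip_decomp u
  constructor
  · intro h
    rw [hw]
    exact h.trans (List.prefix_append _ _)
  · intro h
    rw [hw] at h
    rcases h with ⟨r, hr⟩
    by_cases hle : p.length ≤ (PySem.Chars.rstrip u).length
    · have h1 : p = (PySem.Chars.rstrip u ++ w).take p.length := by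
        rw [← hr]
        simp
      rw [List.take_append_of_le_length hle] at h1
      rw [h1]
      exact List.take_prefix _ _
    · exfalso
      cases hwnil : w with
      | nil =>
          rw [hwnil, List.append_nil] at hr
          apply hle
          rw [← hr]
          simp
      | cons y w' =>
          have hy : y ∈ p := by
            have hlen : (PySem.Chars.rstrip u).length < p.length := by omega
            have : p[(PySem.Chars.rstrip u).length]? = some y := by
              have : (p ++ r)[(PySem.Chars.rstrip u).length]? = some y := by
                rw [hr, hwnil]
                simp
              rwa [List.getElem?_append_left hlen] at this
            exact List.mem_of_getElem? this
          have := hws y (by rw [hwnil]; exact List.mem_cons_self)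
          rw [hp y hy] at this
          exact Bool.false_ne_true this

theorem rstrip_eq_nil_iff (u : List Char) :
    PySem.Chars.rstrip u = [] ↔ ∀ x ∈ u, PySem.Chars.isspace x = true := by
  unfold PySem.Chars.rstrip
  rw [List.reverse_eq_nil_iff, List.dropWhile_eq_nil_iff]
  simp

theorem lineIsText_eq (l : List Char) :
    pvLineIsText (l.foldl bufUpd []) = pvTextLine l := by
  rw [foldl_bufUpd_nil]
  unfold pvLineIsText pvTextLine PySem.Chars.strip PySem.Chars.lstrip
  cases hcase : l.dropWhile PySem.Chars.isspace with
  | nil => simp [PySem.Chars.rstrip, PySem.Chars.startswith]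
  | cons c t =>
      have hc : PySem.Chars.isspace c = false := dropWhile_head_not _ l c t hcase
      have hne : PySem.Chars.rstrip (c :: t) ≠ [] := by
        rw [Ne, rstrip_eq_nil_iff]
        intro h
        rw [h c List.mem_cons_self] at hc
        simp at hc
      have h2 : (PySem.Chars.rstrip (c :: t)).isEmpty = false := by
        simpa [List.isEmpty_iff] using hne
      have hpre : ∀ p : List Char, (∀ x ∈ p, PySem.Chars.isspace x = false) →
          (PySem.Chars.startswith (PySem.Chars.rstrip (c :: t)) p = decide (p <+: c :: t)) := by
        intro p hp
        rw [Bool.eq_iff_iff]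
        simp only [PySem.Chars.startswith, List.isPrefixOf_iff_prefix, decide_eq_true_eq]
        exact prefix_rstrip_iff (c :: t) p hp
      have hp1 : ∀ x ∈ "<!--".toList, PySem.Chars.isspace x = false := by
        intro x hx
        fin_cases hx <;> decide
      have hp2 : ∀ x ∈ "-->".toList, PySem.Chars.isspace x = false := by
        intro x hx
        fin_cases hx <;> decide
      have hp3 : ∀ x ∈ "---".toList, PySem.Chars.isspace x = false := by
        intro x hx
        fin_cases hx <;> decide
      have ht3 : List.take 3 (List.take 4 (c :: t)) = List.take 3 (c :: t) := by
        simp [List.take_take]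
      have hfac : ∀ (p : List Char) (n : Nat), p.length = n → (∀ x ∈ p, PySem.Chars.isspace x = false) →
          decide (List.take n (c :: t) ≠ p) = !PySem.Chars.startswith (PySem.Chars.rstrip (c :: t)) p := by
        intro p n hn hp
        rw [hpre p hp, Bool.eq_iff_iff]
        subst hn
        simp only [decide_eq_true_eq, Bool.not_eq_true', decide_eq_false_iff_not,
          List.prefix_iff_eq_take]
        exact ne_comm
      rw [ht3, hfac "<!--".toList 4 rfl hp1, hfac "-->".toList 3 rfl hp2,
          hfac "---".toList 3 rfl hp3, h2,
          show List.take 4 (c :: t) = c :: List.take 3 t from rfl]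
      rfl

-- assembling everything
theorem isIn_eq_decide (p s : List Char) : PySem.Chars.isIn p s = decide (p <:+: s) := by
  rcases h : PySem.Chars.isIn p s with _ | _
  · rw [PySem.Chars.isIn_eq_false_iff] at h; simp [h]
  · rw [PySem.Chars.isIn_iff_infix] at h; simp [h]

-- ===== VERDICT (by name: the statement is the Claim_ definition above) =====
theorem has_content_spec : Claim_equal_has_content := by
  intro s _
  unfold Spec_has_content has_content has_content_alt
  simp only [foldl_pvStep, foldl_pipe, Bool.false_or,
    foldl_run_eq '-' (by decide) _ 0 (by omega), foldl_run_eq '`' (by decide) _ 0 (by omega),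
    foldl_h3_eq _ 0, foldl_text_eq, filter_pos_eq_any, splitOn_eq_split1,
    List.any_cons, lineIsText_eq, Nat.zero_min, isIn_eq_decide,
    List.replicate_zero, List.nil_append]
  rw [show ∀ u : List Char, (u.any fun x => x == '|') = PySem.Chars.isIn "|".toList u from
        fun u => (isIn_singleton '|' u).symm, isIn_eq_decide]
  rfl
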